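-- pv_equiv track=rewrite | github.com/GFouilhe-AThiriet/Projet-L3 | functions.py | make_id_species_per_group
-- ===== SOURCE A (Python) =====
-- def make_id_species_per_group(list_of_id_species,sorted_list_of_species_group,list_of_groups):
--     L = []
--     for i in range(len(list_of_groups)):
--         H = []
--         for j in range(len(sorted_list_of_species_group)):
--             if sorted_list_of_species_group[j] == list_of_groups[i]:
--                 H += [list_of_id_species[j]]
--         L += [H]
--     return L
-- ===== SOURCE B (Python) =====
-- def make_id_species_per_group(list_of_id_species, sorted_list_of_species_group, list_of_groups):
--     buckets = {}
--     for grp, sid in zip(sorted_list_of_species_group, list_of_id_species):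
--         buckets.setdefault(grp, []).append(sid)
--     return [list(buckets.get(g, [])) for g in list_of_groups]
-- ===== Notes on version B (the rewrite author's own statement) =====
-- stated objective: faster
-- what changed: Replaces the nested scan (one full pass over the species list per group) with a single pass building a dict group->ids, then one lookup per group.
import Mathlib
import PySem

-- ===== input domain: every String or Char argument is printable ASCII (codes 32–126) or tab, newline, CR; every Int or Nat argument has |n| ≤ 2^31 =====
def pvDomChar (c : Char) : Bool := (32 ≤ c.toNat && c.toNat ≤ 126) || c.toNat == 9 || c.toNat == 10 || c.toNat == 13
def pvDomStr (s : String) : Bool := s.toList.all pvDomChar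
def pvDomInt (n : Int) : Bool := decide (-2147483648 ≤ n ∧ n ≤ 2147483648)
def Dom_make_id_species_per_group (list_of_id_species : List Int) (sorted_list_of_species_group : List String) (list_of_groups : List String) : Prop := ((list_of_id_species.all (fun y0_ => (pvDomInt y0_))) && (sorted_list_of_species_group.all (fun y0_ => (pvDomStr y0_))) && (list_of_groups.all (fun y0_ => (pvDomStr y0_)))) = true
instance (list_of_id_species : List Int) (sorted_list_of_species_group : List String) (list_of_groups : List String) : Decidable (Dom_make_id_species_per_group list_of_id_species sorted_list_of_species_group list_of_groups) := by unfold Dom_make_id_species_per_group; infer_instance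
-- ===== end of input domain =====

-- B: single pass building a dict group->ids, then one lookup per group (asymptotically faster than A's nested scans).


-- ===== PORT A =====
def make_id_species_per_group (list_of_id_species : List Int) (sorted_list_of_species_group : List String) (list_of_groups : List String) : List (List Int) :=
  (PySem.List.pyRange 0 (list_of_groups.length : Int) 1).foldl (fun L i =>
    L ++ [ (PySem.List.pyRange 0 (sorted_list_of_species_group.length : Int) 1).foldl (fun H j =>
      if PySem.List.pyGetD sorted_list_of_species_group j "" == PySem.List.pyGetD list_of_groups i "" then
        H ++ [PySem.List.pyGetD list_of_id_species j 0]
      else H) [] ]) []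

-- ===== PORT B =====
def make_id_species_per_group_alt (list_of_id_species : List Int) (sorted_list_of_species_group : List String) (list_of_groups : List String) : List (List Int) :=
  let buckets := (sorted_list_of_species_group.zip list_of_id_species).foldl
    (fun d p => d.modify p.1 [] (fun l => l ++ [p.2])) PySem.Dict.empty
  list_of_groups.map (fun g => buckets.getD g [])

-- ===== PRECONDITION & SPEC =====
-- Pre_ excludes exactly the inputs where A raises IndexError: a species at an index beyond
-- the length of the id list whose group label occurs in list_of_groups.
def Pre_make_id_species_per_group (list_of_id_species : List Int) (sorted_list_of_species_group : List String) (list_of_groups : List String) : Prop :=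
  ∀ j : Nat, (h : j < sorted_list_of_species_group.length) →
    sorted_list_of_species_group[j] ∈ list_of_groups → j < list_of_id_species.length
instance (list_of_id_species : List Int) (sorted_list_of_species_group : List String) (list_of_groups : List String) : Decidable (Pre_make_id_species_per_group list_of_id_species sorted_list_of_species_group list_of_groups) := by unfold Pre_make_id_species_per_group; infer_instance
def pvWitness_make_id_species_per_group : List Int × List String × List String := ([1, 2, 3], ["x", "y", "x"], ["x", "y", "z"])
def Spec_make_id_species_per_group (list_of_id_species : List Int) (sorted_list_of_species_group : List String) (list_of_groups : List String) (out : List (List Int)) : Prop := out = make_id_species_per_group_alt list_of_id_species sorted_list_of_species_group list_of_groups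
instance (list_of_id_species : List Int) (sorted_list_of_species_group : List String) (list_of_groups : List String) (out : List (List Int)) : Decidable (Spec_make_id_species_per_group list_of_id_species sorted_list_of_species_group list_of_groups out) := by unfold Spec_make_id_species_per_group; infer_instance

-- ===== CLAIM (what is proved, stated in full; the proofs are below) =====
def Claim_equal_make_id_species_per_group : Prop := ∀ (list_of_id_species : List Int) (sorted_list_of_species_group : List String) (list_of_groups : List String), Dom_make_id_species_per_group list_of_id_species sorted_list_of_species_group list_of_groups → Pre_make_id_species_per_group list_of_id_species sorted_list_of_species_group list_of_groups → Spec_make_id_species_per_group list_of_id_species sorted_list_of_species_group list_of_groups (make_id_species_per_group list_of_id_species sorted_list_of_species_group list_of_groups)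

-- ===== LEMMAS AND PROOFS =====


lemma inner_eq (s : List String) : ∀ (a : List Int) (g : String),
    (∀ j (_ : j < s.length), s.getD j "" = g → j < a.length) →
    ((List.range s.length).filter (fun j => s.getD j "" == g)).map (fun j => a.getD j 0)
      = ((s.zip a).filter (fun p => p.1 == g)).map (fun p => p.2) := by
  induction s with
  | nil => simp
  | cons x s' ih =>
    intro a g h
    cases a with
    | nil =>
      simp only [List.zip_nil_right, List.filter_nil, List.map_nil]
      rw [List.filter_eq_nil_iff.mpr, List.map_nil]
      intro j hj
      rw [List.mem_range] at hj
      simp only [beq_iff_eq]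
      intro hget
      have := h j hj hget
      simp at this
    | cons b a' =>
      have hrec := ih a' g (by
        intro j hj hg
        have := h (j + 1) (by simpa using Nat.succ_lt_succ hj) (by simpa using hg)
        simpa using this)
      simp only [List.length_cons, List.range_succ_eq_map, List.filter_cons,
        List.zip_cons_cons]
      by_cases hx : x = g
      · rw [if_pos (by simpa using hx), if_pos (by simpa using hx)]
        simp only [List.map_cons, List.getD_cons_zero]
        refine congrArg (fun t => b :: t) ?_
        rw [← hrec, List.filter_map, List.map_map]
        simp [Function.comp_def]
      · rw [if_neg (by simpa using hx), if_neg (by simpa using hx)]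
        rw [← hrec, List.filter_map, List.map_map]
        simp [Function.comp_def]

-- ===== VERDICT (by name: the statement is the Claim_ definition above) =====
theorem make_id_species_per_group_spec : Claim_equal_make_id_species_per_group := by
  intro ids s groups _ hpre
  unfold Spec_make_id_species_per_group make_id_species_per_group make_id_species_per_group_alt
  rw [PySem.List.foldl_append_singleton_eq_map]
  simp only [List.nil_append]
  have houter : (PySem.List.pyRange 0 (groups.length : Int) 1).map
      (fun i => (PySem.List.pyRange 0 (s.length : Int) 1).foldl (fun H j =>
        if PySem.List.pyGetD s j "" == PySem.List.pyGetD groups i "" then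
          H ++ [PySem.List.pyGetD ids j 0] else H) [])
      = groups.map (fun g => (PySem.List.pyRange 0 (s.length : Int) 1).foldl (fun H j =>
        if PySem.List.pyGetD s j "" == g then H ++ [PySem.List.pyGetD ids j 0] else H) []) := by
    conv_rhs => rw [← PySem.List.map_pyGetD_pyRange_zero' groups ""]
    rw [List.map_map]
    simp only [Function.comp_def]
  rw [houter]
  refine List.map_congr_left ?_
  intro g hg
  rw [PySem.List.foldl_append_if (fun j => PySem.List.pyGetD s j "" == g)
    (fun j => PySem.List.pyGetD ids j 0)]
  rw [PySem.Dict.getD_foldl_modify_append, PySem.Dict.getD_empty]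
  simp only [List.nil_append]
  have hcast : PySem.List.pyRange 0 (s.length : Int) 1
      = (List.range s.length).map (fun k : Nat => (k : Int)) := by
    exact PySem.List.pyRange_zero_nat s.length
  rw [hcast, List.filter_map, List.map_map]
  have hkey := inner_eq s ids g (by
    intro j hj hgj
    exact hpre j hj (by rw [List.getD_eq_getElem s "" hj] at hgj; simpa [hgj] using hg))
  simp only [Function.comp_def, PySem.List.pyGetD_natCast]
  exact hkey
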